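-- pv_equiv track=rewrite | github.com/PAHaolam/MMC_DataScience | Module 1/DSMMC_Buoi5_LamHao/lastname_firstname_grad_the_exams.py | answer_scores
-- ===== SOURCE A (Python) =====
-- def answer_scores(lines, answer_key):
--     total = len(lines)
--     scores = [0]*total
--     ids = ['']*total
--     skipped = [0]*25
--     wrong = [0]*25
--
--     for i, line in enumerate(lines):
--         ids[i], *answer_check = line.split(',')
--         for k in range(25):
--             if(answer_check[k] == answer_key[k]): scores[i] += 4
--             elif answer_check[k]:
--                 scores[i] -= 1
--                 wrong[k] += 1
--             else: skipped[k] += 1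
--
--     return ids, scores, skipped, wrong
-- ===== SOURCE B (Python) =====
-- def _grade(answer, correct):
--     # three-way mark for one answer cell
--     if answer == correct:
--         return 'correct'
--     return 'wrong' if answer else 'skip'
--
--
-- def answer_scores(lines, answer_key):
--     # Parse every line once, grade each cell into a mark grid,
--     # then score row-wise and tally skipped/wrong column-wise.
--     rows = [line.split(',') for line in lines]
--     ids = [row[0] for row in rows]
--     key = answer_key[:25]
--     marks = [[_grade(a, c) for a, c in zip(row[1:26], key)] for row in rows]
--     scores = [4 * row.count('correct') - row.count('wrong') for row in marks]
--     columns = [[row[k] for row in marks] for k in range(25)]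
--     skipped = [col.count('skip') for col in columns]
--     wrong = [col.count('wrong') for col in columns]
--     return ids, scores, skipped, wrong
-- ===== Notes on version B (the rewrite author's own statement) =====
-- stated objective: alternative
-- what changed: A makes one pass writing into pre-allocated arrays by index with a three-way branch per cell; B grades every cell once into a mark grid ('correct'/'wrong'/'skip'), scores rows by counting marks (4*correct - wrong) and tallies skipped/wrong by counting marks down each column of an explicit transpose.
import Mathlib
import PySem

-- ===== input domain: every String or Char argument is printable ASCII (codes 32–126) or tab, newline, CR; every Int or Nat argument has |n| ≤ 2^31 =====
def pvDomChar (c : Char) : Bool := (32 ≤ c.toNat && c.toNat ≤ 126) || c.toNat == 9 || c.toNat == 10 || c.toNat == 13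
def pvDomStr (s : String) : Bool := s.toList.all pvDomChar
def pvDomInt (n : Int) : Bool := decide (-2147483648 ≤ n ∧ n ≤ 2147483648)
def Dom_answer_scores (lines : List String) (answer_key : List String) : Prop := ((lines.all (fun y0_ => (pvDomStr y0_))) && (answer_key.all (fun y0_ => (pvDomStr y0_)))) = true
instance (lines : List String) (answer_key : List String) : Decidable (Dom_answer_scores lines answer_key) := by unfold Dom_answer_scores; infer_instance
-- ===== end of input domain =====

-- B grades every answer cell once into a mark grid ('correct'/'wrong'/'skip'), scores rows by
-- counting marks and tallies skipped/wrong by counting marks down each column of an explicit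
-- transpose; A writes into pre-allocated arrays by index in a single pass with a three-way
-- branch per cell.  Objective: alternative.

-- ===== PORT A =====
-- line.split(',') — exact: PySem.Chars.splitOn is s.split(sep) for nonempty sep
def pySplitComma (s : String) : List String :=
  (PySem.Chars.splitOn s.toList [',']).map String.ofList

-- inner loop body: 'for k in range(25): if … elif … else …'
def aInnerStep (answer_check answer_key : List String) (i : Int)
    (st : List String × List Int × List Int × List Int) (k : Int) :
    List String × List Int × List Int × List Int :=
  if PySem.List.pyGetD answer_check k "" = PySem.List.pyGetD answer_key k "" then
    (st.1, PySem.List.pySetD st.2.1 i (PySem.List.pyGetD st.2.1 i 0 + 4), st.2.2.1, st.2.2.2)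
  else if PySem.List.pyGetD answer_check k "" ≠ "" then
    (st.1, PySem.List.pySetD st.2.1 i (PySem.List.pyGetD st.2.1 i 0 - 1), st.2.2.1,
     PySem.List.pySetD st.2.2.2 k (PySem.List.pyGetD st.2.2.2 k 0 + 1))
  else
    (st.1, st.2.1, PySem.List.pySetD st.2.2.1 k (PySem.List.pyGetD st.2.2.1 k 0 + 1), st.2.2.2)

-- outer loop body: "ids[i], *answer_check = line.split(',')" then the inner loop
def aLineStep (answer_key : List String)
    (st : List String × List Int × List Int × List Int) (p : Int × String) :
    List String × List Int × List Int × List Int :=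
  let parts := pySplitComma p.2
  (PySem.List.pyRange 0 25 1).foldl (aInnerStep parts.tail answer_key p.1)
    (PySem.List.pySetD st.1 p.1 (parts.headD ""), st.2.1, st.2.2.1, st.2.2.2)

def answer_scores (lines : List String) (answer_key : List String) :
    List String × List Int × List Int × List Int :=
  (PySem.List.enumerate lines 0).foldl (aLineStep answer_key)
    (List.replicate lines.length "", List.replicate lines.length (0 : Int),
     List.replicate 25 (0 : Int), List.replicate 25 (0 : Int))

-- ===== PORT B =====
-- _grade(answer, correct): three-way mark for one answer cell
def gradeMark (answer correct : String) : String :=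
  if answer = correct then "correct" else if answer ≠ "" then "wrong" else "skip"

def answer_scores_alt (lines : List String) (answer_key : List String) :
    List String × List Int × List Int × List Int :=
  let rows := lines.map (fun line => pySplitComma line)
  let ids := rows.map (fun row => PySem.List.pyGetD row 0 "")   -- row[0]; split always yields ≥ 1 field, so exact
  let key := PySem.List.slice answer_key none (some 25)
  let marks := rows.map (fun row =>
    ((PySem.List.slice row (some 1) (some 26)).zip key).map (fun p => gradeMark p.1 p.2))
  let scores := marks.map (fun row =>
    (4 : Int) * (PySem.List.count row "correct" : Int) - (PySem.List.count row "wrong" : Int))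
  -- row[k]; exact on Pre_ (every marks row has 25 entries there)
  let columns := (PySem.List.pyRange 0 25 1).map
    (fun k => marks.map (fun row => PySem.List.pyGetD row k ""))
  let skipped := columns.map (fun col => (PySem.List.count col "skip" : Int))
  let wrong := columns.map (fun col => (PySem.List.count col "wrong" : Int))
  (ids, scores, skipped, wrong)

-- ===== PRECONDITION & SPEC =====
-- Pre_ = exactly the inputs where A returns: every line splits into at least 26 fields
-- (id + 25 answers; otherwise answer_check[k] raises IndexError) and, if any line exists,
-- the key has at least 25 entries (otherwise answer_key[k] raises IndexError).
def Pre_answer_scores (lines : List String) (answer_key : List String) : Prop :=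
  (∀ l ∈ lines, 26 ≤ (pySplitComma l).length) ∧
  (lines = [] ∨ 25 ≤ answer_key.length)
instance (lines : List String) (answer_key : List String) :
    Decidable (Pre_answer_scores lines answer_key) := by
  unfold Pre_answer_scores; infer_instance

def pvWitness_answer_scores : List String × List String :=
  (["id0,A,B,C,D,A,B,C,D,A,B,C,D,A,B,C,D,A,B,C,D,A,B,C,D,A"],
   ["A", "B", "C", "D", "A", "B", "C", "D", "A", "B", "C", "D", "A",
    "B", "C", "D", "A", "B", "C", "D", "A", "B", "C", "D", "B"])

def Spec_answer_scores (lines : List String) (answer_key : List String)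
    (out : List String × List Int × List Int × List Int) : Prop :=
  out = answer_scores_alt lines answer_key
instance (lines : List String) (answer_key : List String)
    (out : List String × List Int × List Int × List Int) :
    Decidable (Spec_answer_scores lines answer_key out) := by
  unfold Spec_answer_scores; infer_instance

-- ===== CLAIM (what is proved, stated in full; the proofs are below) =====
def Claim_equal_answer_scores : Prop := ∀ (lines : List String) (answer_key : List String), Dom_answer_scores lines answer_key → Pre_answer_scores lines answer_key → Spec_answer_scores lines answer_key (answer_scores lines answer_key)

-- ===== LEMMAS AND PROOFS =====

-- abbreviations for A's per-line data
def idOf (l : String) : String := (pySplitComma l).headD ""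
def acOf (l : String) : List String := (pySplitComma l).tail
def ptOf (row key : List String) (k : Nat) : Int :=
  if row.getD k "" = key.getD k "" then 4 else if row.getD k "" ≠ "" then -1 else 0
def skInd (row key : List String) (k : Nat) : Int :=
  if row.getD k "" = "" ∧ row.getD k "" ≠ key.getD k "" then 1 else 0
def wrInd (row key : List String) (k : Nat) : Int :=
  if row.getD k "" ≠ "" ∧ row.getD k "" ≠ key.getD k "" then 1 else 0
def ptsFrom (row key : List String) (a : Nat) : Int :=
  if a < 25 then ptOf row key a + ptsFrom row key (a + 1) else 0
termination_by 25 - a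
def colSk (lines key : List String) (k : Nat) : Int :=
  (lines.map (fun l => skInd (acOf l) key k)).sum
def colWr (lines key : List String) (k : Nat) : Int :=
  (lines.map (fun l => wrInd (acOf l) key k)).sum

theorem headD_eq_getD {α : Type} (l : List α) (d : α) : l.headD d = l.getD 0 d := by
  cases l <;> rfl

theorem getD_set_self (l : List Int) (i : Nat) (x : Int) (h : i < l.length) :
    (l.set i x).getD i 0 = x := by
  rw [List.getD_eq_getElem _ _ (by simpa)]
  exact List.getElem_set_self (by simpa)

theorem set_getD_self {α : Type} (l : List α) (i : Nat) (d : α) (_h : i < l.length) :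
    l.set i (l.getD i d) = l := by
  apply List.ext_getElem (by simp)
  intro j h1 h2
  by_cases hij : i = j
  · subst hij; rw [List.getElem_set_self h1, List.getD_eq_getElem _ _ h2]
  · rw [List.getElem_set_ne hij]

theorem mapIdx_top (l : List Int) (f : Nat → Int) (hl : l.length = 25) :
    l.mapIdx (fun k v => if 25 ≤ k then v + f k else v) = l := by
  apply List.ext_getElem (by simp)
  intro j h1 h2
  rw [List.getElem_mapIdx]
  have : ¬ 25 ≤ j := by omega
  simp [this]

theorem mapIdx_skip_step (l : List Int) (a : Nat) (f : Nat → Int) (hfa : f a = 0) :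
    l.mapIdx (fun k v => if a + 1 ≤ k then v + f k else v)
    = l.mapIdx (fun k v => if a ≤ k then v + f k else v) := by
  apply List.ext_getElem (by simp)
  intro j h1 h2
  rw [List.getElem_mapIdx, List.getElem_mapIdx]
  by_cases hj : j = a
  · subst hj; simp [hfa]
  · have : (a + 1 ≤ j) ↔ (a ≤ j) := by omega
    simp [this]

theorem mapIdx_set_step (l : List Int) (a : Nat) (f : Nat → Int) (ha : a < l.length) :
    (l.set a (l.getD a 0 + f a)).mapIdx (fun k v => if a + 1 ≤ k then v + f k else v)
    = l.mapIdx (fun k v => if a ≤ k then v + f k else v) := by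
  apply List.ext_getElem (by simp)
  intro j h1 h2
  rw [List.getElem_mapIdx, List.getElem_mapIdx]
  by_cases hj : j = a
  · subst hj
    rw [List.getElem_set_self (by simpa)]
    have h3 : ¬ (j + 1 ≤ j) := by omega
    simp [h3, List.getElem?_eq_getElem ha]
  · rw [List.getElem_set_ne (fun e => hj e.symm)]
    have : (a + 1 ≤ j) ↔ (a ≤ j) := by omega
    simp [this]

theorem inner_eq (row key : List String) (i : Nat) (ids : List String)
    (scores skipped wrong : List Int) (a : Nat)
    (hi : i < scores.length) (hsk : skipped.length = 25) (hwr : wrong.length = 25)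
    (ha : a ≤ 25) :
    (PySem.List.pyRange (a : Int) 25 1).foldl (aInnerStep row key (i : Int))
      (ids, scores, skipped, wrong)
    = (ids,
       scores.set i (scores.getD i 0 + ptsFrom row key a),
       skipped.mapIdx (fun k v => if a ≤ k then v + skInd row key k else v),
       wrong.mapIdx (fun k v => if a ≤ k then v + wrInd row key k else v)) := by
  by_cases hlt : a < 25
  · have hcast : ((a : Int)) < 25 := by exact_mod_cast hlt
    rw [PySem.List.pyRange_one_cons hcast, List.foldl_cons,
        show ((a : Int) + 1) = (((a + 1 : Nat)) : Int) by push_cast; ring]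
    have hpts : ptsFrom row key a = ptOf row key a + ptsFrom row key (a + 1) := by
      rw [ptsFrom]; simp [hlt]
    by_cases h1 : row.getD a "" = key.getD a ""
    · have e : aInnerStep row key (i : Int) (ids, scores, skipped, wrong) (a : Int)
          = (ids, scores.set i (scores.getD i 0 + 4), skipped, wrong) := by
        simp only [aInnerStep, PySem.List.pyGetD_natCast, PySem.List.pySetD_natCast]
        rw [if_pos h1]
      rw [e, inner_eq row key i _ _ _ _ (a + 1) (by simpa) hsk hwr (by omega)]
      have hpt : ptOf row key a = 4 := by unfold ptOf; rw [if_pos h1]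
      have hsk0 : skInd row key a = 0 := by unfold skInd; rw [if_neg (fun h => h.2 h1)]
      have hwr0 : wrInd row key a = 0 := by unfold wrInd; rw [if_neg (fun h => h.2 h1)]
      refine congrArg _ ?_
      refine Prod.ext ?_ (Prod.ext ?_ ?_) <;> dsimp only
      · rw [getD_set_self _ _ _ hi, List.set_set, hpts, hpt]; ring_nf
      · rw [mapIdx_skip_step _ _ _ hsk0]
      · rw [mapIdx_skip_step _ _ _ hwr0]
    · by_cases h2 : row.getD a "" = ""
      · -- skipped branch
        have e : aInnerStep row key (i : Int) (ids, scores, skipped, wrong) (a : Int)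
            = (ids, scores, skipped.set a (skipped.getD a 0 + 1), wrong) := by
          simp only [aInnerStep, PySem.List.pyGetD_natCast, PySem.List.pySetD_natCast]
          rw [if_neg h1, if_neg (not_not_intro h2)]
        rw [e, inner_eq row key i _ _ _ _ (a + 1) hi (by simpa) hwr (by omega)]
        have hpt : ptOf row key a = 0 := by
          unfold ptOf; rw [if_neg h1, if_neg (not_not_intro h2)]
        have hsk1 : skInd row key a = 1 := by unfold skInd; rw [if_pos ⟨h2, h1⟩]
        have hwr0 : wrInd row key a = 0 := by unfold wrInd; rw [if_neg (fun h => h.1 h2)]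
        refine congrArg _ ?_
        refine Prod.ext ?_ (Prod.ext ?_ ?_) <;> dsimp only
        · rw [hpts, hpt]; ring_nf
        · rw [← hsk1, mapIdx_set_step _ _ _ (by omega)]
        · rw [mapIdx_skip_step _ _ _ hwr0]
      · -- wrong branch
        have e : aInnerStep row key (i : Int) (ids, scores, skipped, wrong) (a : Int)
            = (ids, scores.set i (scores.getD i 0 - 1), skipped,
               wrong.set a (wrong.getD a 0 + 1)) := by
          simp only [aInnerStep, PySem.List.pyGetD_natCast, PySem.List.pySetD_natCast]
          rw [if_neg h1, if_pos h2]
        rw [e, inner_eq row key i _ _ _ _ (a + 1) (by simpa) hsk (by simpa) (by omega)]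
        have hpt : ptOf row key a = -1 := by unfold ptOf; rw [if_neg h1, if_pos h2]
        have hsk0 : skInd row key a = 0 := by unfold skInd; rw [if_neg (fun h => h2 h.1)]
        have hwr1 : wrInd row key a = 1 := by unfold wrInd; rw [if_pos ⟨h2, h1⟩]
        refine congrArg _ ?_
        refine Prod.ext ?_ (Prod.ext ?_ ?_) <;> dsimp only
        · rw [getD_set_self _ _ _ hi, List.set_set, hpts, hpt]; ring_nf
        · rw [mapIdx_skip_step _ _ _ hsk0]
        · rw [← hwr1, mapIdx_set_step _ _ _ (by omega)]
  · have ha25 : a = 25 := by omega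
    subst ha25
    have hnil : PySem.List.pyRange (((25 : Nat)) : Int) 25 1 = [] := by
      apply List.eq_nil_of_length_eq_zero
      rw [PySem.List.length_pyRange_one]; simp
    rw [hnil, List.foldl_nil]
    have hpts : ptsFrom row key 25 = 0 := by rw [ptsFrom]; simp
    rw [hpts, mapIdx_top _ _ hsk, mapIdx_top _ _ hwr, add_zero, set_getD_self _ _ _ hi]
termination_by 25 - a

theorem colSk_cons (l : String) (rest key : List String) (k : Nat) :
    colSk (l :: rest) key k = skInd (acOf l) key k + colSk rest key k := by
  simp [colSk]

theorem colWr_cons (l : String) (rest key : List String) (k : Nat) :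
    colWr (l :: rest) key k = wrInd (acOf l) key k + colWr rest key k := by
  simp [colWr]

theorem outer_eq (key : List String) (lines : List String) (i0 : Nat)
    (ids : List String) (scores skipped wrong : List Int)
    (hlen : i0 + lines.length ≤ scores.length) (hids : ids.length = scores.length)
    (hsk : skipped.length = 25) (hwr : wrong.length = 25) :
    (PySem.List.enumerate lines (i0 : Int)).foldl (aLineStep key)
      (ids, scores, skipped, wrong)
    = (ids.mapIdx (fun j v => if i0 ≤ j ∧ j < i0 + lines.length then idOf (lines.getD (j - i0) "") else v),
       scores.mapIdx (fun j v => if i0 ≤ j ∧ j < i0 + lines.length then v + ptsFrom (acOf (lines.getD (j - i0) "")) key 0 else v),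
       skipped.mapIdx (fun k v => v + colSk lines key k),
       wrong.mapIdx (fun k v => v + colWr lines key k)) := by
  induction lines generalizing i0 ids scores skipped wrong with
  | nil =>
    rw [PySem.List.enumerate_nil, List.foldl_nil]
    refine Prod.ext ?_ (Prod.ext ?_ (Prod.ext ?_ ?_)) <;> dsimp only
    · refine (List.ext_getElem (by simp) ?_).symm
      intro j h1 h2
      rw [List.getElem_mapIdx]
      simp
    · refine (List.ext_getElem (by simp) ?_).symm
      intro j h1 h2
      rw [List.getElem_mapIdx]
      simp
    · refine (List.ext_getElem (by simp) ?_).symm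
      intro j h1 h2
      rw [List.getElem_mapIdx]
      simp [colSk]
    · refine (List.ext_getElem (by simp) ?_).symm
      intro j h1 h2
      rw [List.getElem_mapIdx]
      simp [colWr]
  | cons l rest ih =>
    have hi : i0 < scores.length := by simp [List.length_cons] at hlen; omega
    rw [PySem.List.enumerate_cons, List.foldl_cons]
    have hstep : aLineStep key (ids, scores, skipped, wrong) ((i0 : Int), l)
        = (PySem.List.pyRange 0 25 1).foldl (aInnerStep (acOf l) key (i0 : Int))
            (ids.set i0 (idOf l), scores, skipped, wrong) := by
      simp only [aLineStep, acOf, idOf, PySem.List.pySetD_natCast]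
    rw [hstep]
    have hin := inner_eq (acOf l) key i0 (ids.set i0 (idOf l)) scores skipped wrong 0
      hi hsk hwr (by omega)
    rw [Nat.cast_zero] at hin
    rw [hin]
    simp only [Nat.zero_le, if_true]
    rw [show ((i0 : Int) + 1) = (((i0 + 1 : Nat)) : Int) by push_cast; ring]
    rw [ih (i0 + 1) (ids.set i0 (idOf l))
          (scores.set i0 (scores.getD i0 0 + ptsFrom (acOf l) key 0))
          (skipped.mapIdx fun k v => v + skInd (acOf l) key k)
          (wrong.mapIdx fun k v => v + wrInd (acOf l) key k)
          (by simp [List.length_cons] at hlen ⊢; omega)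
          (by simp [hids]) (by simp [hsk]) (by simp [hwr])]
    refine Prod.ext ?_ (Prod.ext ?_ (Prod.ext ?_ ?_)) <;> dsimp only
    · apply List.ext_getElem (by simp)
      intro j h1 h2
      rw [List.getElem_mapIdx, List.getElem_mapIdx]
      simp only [List.length_cons]
      by_cases hj : j = i0
      · subst hj
        have c1 : ¬ (j + 1 ≤ j ∧ j < j + 1 + rest.length) := by omega
        have c2 : j ≤ j ∧ j < j + (rest.length + 1) := by omega
        rw [if_neg c1, if_pos c2, List.getElem_set_self (by simpa using (by simpa [hids] using hi))]
        simp
      · by_cases hj2 : i0 + 1 ≤ j ∧ j < i0 + 1 + rest.length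
        · rw [if_pos hj2, if_pos (by omega)]
          have hsub : j - i0 = (j - (i0 + 1)) + 1 := by omega
          rw [hsub, List.getD_cons_succ]
        · rw [if_neg hj2, if_neg (by omega), List.getElem_set_ne (fun e => hj e.symm)]
    · apply List.ext_getElem (by simp)
      intro j h1 h2
      rw [List.getElem_mapIdx, List.getElem_mapIdx]
      simp only [List.length_cons]
      by_cases hj : j = i0
      · subst hj
        have c1 : ¬ (j + 1 ≤ j ∧ j < j + 1 + rest.length) := by omega
        have c2 : j ≤ j ∧ j < j + (rest.length + 1) := by omega
        rw [if_neg c1, if_pos c2, List.getElem_set_self (by simpa using hi)]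
        simp [List.getElem?_eq_getElem hi]
      · by_cases hj2 : i0 + 1 ≤ j ∧ j < i0 + 1 + rest.length
        · rw [if_pos hj2, if_pos (by omega), List.getElem_set_ne (fun e => hj e.symm)]
          have hsub : j - i0 = (j - (i0 + 1)) + 1 := by omega
          rw [hsub, List.getD_cons_succ]
        · rw [if_neg hj2, if_neg (by omega), List.getElem_set_ne (fun e => hj e.symm)]
    · apply List.ext_getElem (by simp)
      intro j h1 h2
      rw [List.getElem_mapIdx, List.getElem_mapIdx, List.getElem_mapIdx, colSk_cons]
      ring
    · apply List.ext_getElem (by simp)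
      intro j h1 h2
      rw [List.getElem_mapIdx, List.getElem_mapIdx, List.getElem_mapIdx, colWr_cons]
      ring

-- ---- B-side lemmas ----

theorem slice_ac (l : String) : PySem.List.slice (pySplitComma l) (some 1) (some 26)
    = (acOf l).take 25 := by
  have := PySem.List.slice_natCast (pySplitComma l) 1 26
  simpa [acOf, List.drop_one] using this

theorem slice_key (key : List String) : PySem.List.slice key none (some 25) = key.take 25 := by
  simpa using PySem.List.slice_to_natCast key 25

theorem pcount_cons (x : String) (l : List String) (v : String) :
    ((PySem.List.count (x :: l) v : Nat) : Int)
    = (if x = v then 1 else 0) + ((PySem.List.count l v : Nat) : Int) := by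
  rw [PySem.List.count_eq, PySem.List.count_eq, List.count_cons]
  by_cases h : x = v
  · simp [h]; ring
  · simp [h]

-- grade marks versus A's per-cell indicators
theorem grade_skip (a c : String) :
    (if gradeMark a c = "skip" then (1 : Int) else 0) = (if a = "" ∧ a ≠ c then 1 else 0) := by
  unfold gradeMark
  by_cases h1 : a = c
  · simp [h1]
  · by_cases h2 : a = ""
    · simp [h2]
    · simp [h1, h2]

theorem grade_wrong (a c : String) :
    (if gradeMark a c = "wrong" then (1 : Int) else 0) = (if a ≠ "" ∧ a ≠ c then 1 else 0) := by
  unfold gradeMark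
  by_cases h1 : a = c
  · simp [h1]
  · by_cases h2 : a = ""
    · have h3 : ¬ c = "" := fun e => h1 (by rw [h2, e])
      simp [h2, h3]
    · simp [h1, h2]

-- the zipped-and-graded row of one line
def mRow (key : List String) (l : String) : List String :=
  (((acOf l).take 25).zip (key.take 25)).map (fun p => gradeMark p.1 p.2)

theorem acOf_len (l : String) (h : 26 ≤ (pySplitComma l).length) : 25 ≤ (acOf l).length := by
  simp [acOf, List.length_tail]; omega

theorem mRow_len (key : List String) (l : String)
    (h1 : 26 ≤ (pySplitComma l).length) (h2 : 25 ≤ key.length) : (mRow key l).length = 25 := by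
  have := acOf_len l h1
  simp [mRow]; omega

theorem mRow_getD (key : List String) (l : String) (k : Nat)
    (h1 : 26 ≤ (pySplitComma l).length) (h2 : 25 ≤ key.length) (hk : k < 25) :
    (mRow key l).getD k "" = gradeMark ((acOf l).getD k "") (key.getD k "") := by
  have hac := acOf_len l h1
  have hlen := mRow_len key l h1 h2
  have hk' : k < (mRow key l).length := by omega
  rw [List.getD_eq_getElem _ _ hk']
  unfold mRow
  unfold mRow at hk'
  rw [List.getElem_map, List.getElem_zip, List.getElem_take, List.getElem_take]
  congr 1
  · rw [List.getD_eq_getElem _ _ (by omega)]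
  · rw [List.getD_eq_getElem _ _ (by omega)]

-- score of one row: 4 * (#correct) - (#wrong) equals A's running sum
theorem marks_pts (ac key : List String) (h1 : 25 ≤ ac.length) (h2 : 25 ≤ key.length)
    (a : Nat) (ha : a ≤ 25) :
    (4 : Int) * ((PySem.List.count ((((ac.take 25).zip (key.take 25)).drop a).map
        (fun p => gradeMark p.1 p.2)) "correct" : Nat) : Int)
      - ((PySem.List.count ((((ac.take 25).zip (key.take 25)).drop a).map
        (fun p => gradeMark p.1 p.2)) "wrong" : Nat) : Int)
    = ptsFrom ac key a := by
  have hlen : ((ac.take 25).zip (key.take 25)).length = 25 := by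
    rw [List.length_zip]; simp; omega
  by_cases hlt : a < 25
  · rw [List.drop_eq_getElem_cons (by omega), List.map_cons, pcount_cons, pcount_cons]
    have hz : ((ac.take 25).zip (key.take 25))[a]'(by omega)
        = (ac[a]'(by omega), key[a]'(by omega)) := by
      rw [List.getElem_zip, List.getElem_take, List.getElem_take]
    have hrec := marks_pts ac key h1 h2 (a + 1) (by omega)
    have hpts : ptsFrom ac key a = ptOf ac key a + ptsFrom ac key (a + 1) := by
      rw [ptsFrom]; simp [hlt]
    have hpt : ptOf ac key a = (if ac[a]'(by omega) = key[a]'(by omega) then 4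
        else if ac[a]'(by omega) ≠ "" then -1 else 0) := by
      unfold ptOf
      rw [List.getD_eq_getElem _ _ (by omega), List.getD_eq_getElem _ _ (by omega)]
    rw [hz, hpts, hpt, ← hrec]
    set cc := ((PySem.List.count ((((ac.take 25).zip (key.take 25)).drop (a + 1)).map
        (fun p => gradeMark p.1 p.2)) "correct" : Nat) : Int)
    set cw := ((PySem.List.count ((((ac.take 25).zip (key.take 25)).drop (a + 1)).map
        (fun p => gradeMark p.1 p.2)) "wrong" : Nat) : Int)
    unfold gradeMark
    dsimp only
    by_cases hc1 : ac[a]'(by omega) = key[a]'(by omega)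
    · simp [hc1]
      try ring
    · by_cases hc2 : ac[a]'(by omega) = ""
      · have h3 : ¬ (key[a]'(by omega)) = "" := fun e => hc1 (by rw [hc2, e])
        simp [hc2, h3]
        try ring
      · simp [hc1, hc2]
        try ring
  · have ha25 : a = 25 := by omega
    subst ha25
    rw [List.drop_eq_nil_of_le (by omega)]
    have hpts : ptsFrom ac key 25 = 0 := by rw [ptsFrom]; simp
    rw [hpts]
    simp [PySem.List.count_eq]
termination_by 25 - a

-- column tallies: counting a mark down column k equals summing A's indicator over the lines
theorem col_count_skip (lines key : List String) (k : Nat) (hk : k < 25)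
    (h2 : 25 ≤ key.length) (hsplit : ∀ l ∈ lines, 26 ≤ (pySplitComma l).length) :
    ((PySem.List.count (lines.map (fun l => (mRow key l).getD k "")) "skip" : Nat) : Int)
    = colSk lines key k := by
  induction lines with
  | nil => simp [PySem.List.count_eq, colSk]
  | cons l rest ih =>
    rw [List.map_cons, pcount_cons, colSk_cons,
        ih (fun x hx => hsplit x (List.mem_cons_of_mem l hx))]
    have h1 := hsplit l (List.mem_cons_self)
    rw [mRow_getD key l k h1 h2 hk]
    have := grade_skip ((acOf l).getD k "") (key.getD k "")
    unfold skInd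
    rw [this]

theorem col_count_wrong (lines key : List String) (k : Nat) (hk : k < 25)
    (h2 : 25 ≤ key.length) (hsplit : ∀ l ∈ lines, 26 ≤ (pySplitComma l).length) :
    ((PySem.List.count (lines.map (fun l => (mRow key l).getD k "")) "wrong" : Nat) : Int)
    = colWr lines key k := by
  induction lines with
  | nil => simp [PySem.List.count_eq, colWr]
  | cons l rest ih =>
    rw [List.map_cons, pcount_cons, colWr_cons,
        ih (fun x hx => hsplit x (List.mem_cons_of_mem l hx))]
    have h1 := hsplit l (List.mem_cons_self)
    rw [mRow_getD key l k h1 h2 hk]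
    have := grade_wrong ((acOf l).getD k "") (key.getD k "")
    unfold wrInd
    rw [this]

theorem pyRange25 : PySem.List.pyRange 0 25 1 = List.map (fun k : Nat => (k : Int)) (List.range 25) := by
  have h := PySem.List.pyRange_zero_natCast 25
  rwa [show (((25 : Nat)) : Int) = (25 : Int) from rfl] at h

-- ===== VERDICT (by name: the statement is the Claim_ definition above) =====
theorem answer_scores_spec : Claim_equal_answer_scores := by
  intro lines key hdom hpre
  obtain ⟨hsplit, hkey⟩ := hpre
  unfold Spec_answer_scores
  simp only [answer_scores, answer_scores_alt]
  have ho := outer_eq key lines 0 (List.replicate lines.length "")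
      (List.replicate lines.length 0) (List.replicate 25 0) (List.replicate 25 0)
      (by simp) (by simp) (by simp) (by simp)
  rw [Nat.cast_zero] at ho
  rw [ho]
  by_cases hnil : lines = []
  · subst hnil
    simp [colSk, colWr, PySem.List.count_eq]
  have hk25 : 25 ≤ key.length := by
    rcases hkey with h | h
    · exact absurd h hnil
    · exact h
  refine Prod.ext ?_ (Prod.ext ?_ (Prod.ext ?_ ?_)) <;> dsimp only
  · -- ids
    apply List.ext_getElem (by simp)
    intro j h1 h2
    rw [List.getElem_mapIdx]
    simp only [List.map_map, List.getElem_map, Function.comp]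
    have hj : j < lines.length := by simpa using h2
    have hc : (0 ≤ j ∧ j < 0 + lines.length) := by omega
    rw [if_pos hc, PySem.List.pyGetD_zero, idOf, headD_eq_getD,
        Nat.sub_zero, List.getD_eq_getElem _ _ hj]
  · -- scores
    apply List.ext_getElem (by simp)
    intro j h1 h2
    rw [List.getElem_mapIdx]
    simp only [List.map_map, List.getElem_map, Function.comp]
    have hj : j < lines.length := by simpa using h2
    have hc : (0 ≤ j ∧ j < 0 + lines.length) := by omega
    rw [if_pos hc, Nat.sub_zero, List.getD_eq_getElem _ _ hj,
        List.getElem_replicate, zero_add]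
    simp only [slice_ac, slice_key]
    have hac := acOf_len (lines[j]) (hsplit _ (List.getElem_mem hj))
    have := marks_pts (acOf lines[j]) key hac hk25 0 (by omega)
    rw [List.drop_zero] at this
    exact this.symm
  · -- skipped
    apply List.ext_getElem (by
      simp [PySem.List.length_pyRange_one])
    intro k h1 h2
    have hk : k < 25 := by simpa using h1
    rw [List.getElem_mapIdx, List.getElem_replicate, List.getElem_map, List.getElem_map]
    have hr : ∀ (h : k < (PySem.List.pyRange 0 25 1).length),
        (PySem.List.pyRange 0 25 1)[k] = (k : Int) := by
      intro h
      rw [List.getElem_of_eq pyRange25, List.getElem_map, List.getElem_range]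
    rw [hr (by simpa using h2)]
    simp only [List.map_map, Function.comp_def, zero_add]
    have hmaps : lines.map (fun l =>
        PySem.List.pyGetD (((PySem.List.slice (pySplitComma l) (some 1) (some 26)).zip
          (PySem.List.slice key none (some 25))).map (fun p => gradeMark p.1 p.2)) (k : Int) "")
        = lines.map (fun l => (mRow key l).getD k "") := by
      apply List.map_congr_left
      intro l _
      simp only [slice_ac, slice_key, PySem.List.pyGetD_natCast]
      rfl
    rw [hmaps, col_count_skip lines key k hk hk25 hsplit]
  · -- wrong
    apply List.ext_getElem (by
      simp [PySem.List.length_pyRange_one])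
    intro k h1 h2
    have hk : k < 25 := by simpa using h1
    rw [List.getElem_mapIdx, List.getElem_replicate, List.getElem_map, List.getElem_map]
    have hr : ∀ (h : k < (PySem.List.pyRange 0 25 1).length),
        (PySem.List.pyRange 0 25 1)[k] = (k : Int) := by
      intro h
      rw [List.getElem_of_eq pyRange25, List.getElem_map, List.getElem_range]
    rw [hr (by simpa using h2)]
    simp only [List.map_map, Function.comp_def, zero_add]
    have hmaps : lines.map (fun l =>
        PySem.List.pyGetD (((PySem.List.slice (pySplitComma l) (some 1) (some 26)).zip
          (PySem.List.slice key none (some 25))).map (fun p => gradeMark p.1 p.2)) (k : Int) "")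
        = lines.map (fun l => (mRow key l).getD k "") := by
      apply List.map_congr_left
      intro l _
      simp only [slice_ac, slice_key, PySem.List.pyGetD_natCast]
      rfl
    rw [hmaps, col_count_wrong lines key k hk hk25 hsplit]
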